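-- pv_equiv track=rewrite | github.com/bencart/advent-2024 | src/day_4.py | get_all_strings
-- ===== SOURCE A (Python) =====
-- def get_all_strings(grid: str) -> list[str]:
--     lines = [l for l in grid.splitlines() if l.strip()]
--     num_rows = len(lines)
--     num_cols = max(len(line) for line in lines)
--
--     rows = lines
--     columns = ["".join(line[col] for line in lines) for col in range(num_cols)]
--
--     diagonals_tl_br = [
--         "".join(lines[row][d - row] for row in range(num_rows) if 0 <= d - row < num_cols)
--         for d in range(num_rows + num_cols - 1)
--     ]
--     diagonals_tr_bl = [
--         "".join(
--             lines[row][row + d - (num_rows - 1)] for row in range(num_rows) if 0 <= row + d - (num_rows - 1) < num_cols)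
--         for d in range(num_rows + num_cols - 1)
--     ]
--     return rows + columns + diagonals_tl_br + diagonals_tr_bl
-- ===== SOURCE B (Python) =====
-- def get_all_strings(grid: str) -> list[str]:
--     lines = [l for l in grid.splitlines() if l.strip()]
--     num_rows = len(lines)
--     num_cols = max(len(line) for line in lines)
--     cols = {}
--     d1 = {}
--     d2 = {}
--     for r, line in enumerate(lines):
--         for c, ch in enumerate(line):
--             cols.setdefault(c, []).append(ch)
--             d1.setdefault(r + c, []).append(ch)
--             d2.setdefault(c - r + num_rows - 1, []).append(ch)
--     return (lines
--             + ["".join(cols.get(c, [])) for c in range(num_cols)]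
--             + ["".join(d1.get(d, [])) for d in range(num_rows + num_cols - 1)]
--             + ["".join(d2.get(d, [])) for d in range(num_rows + num_cols - 1)])
-- ===== Notes on version B (the rewrite author's own statement) =====
-- stated objective: alternative
-- what changed: A rescans all rows once per column and once per diagonal index; B makes a single pass over the cells, bucketing each character into per-column and per-diagonal dicts, then reads the buckets out.
import Mathlib
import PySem

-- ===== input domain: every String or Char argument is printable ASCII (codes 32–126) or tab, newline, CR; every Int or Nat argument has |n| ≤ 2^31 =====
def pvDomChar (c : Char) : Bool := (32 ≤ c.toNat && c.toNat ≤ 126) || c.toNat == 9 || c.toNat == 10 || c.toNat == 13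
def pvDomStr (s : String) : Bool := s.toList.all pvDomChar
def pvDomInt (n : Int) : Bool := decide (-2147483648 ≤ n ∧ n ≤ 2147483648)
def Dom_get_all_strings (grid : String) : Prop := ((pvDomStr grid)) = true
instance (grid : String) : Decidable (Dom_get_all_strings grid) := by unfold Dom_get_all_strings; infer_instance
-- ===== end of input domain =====

-- B replaces A's per-column and per-diagonal rescans of the whole grid by one pass that
-- buckets each cell into its column/diagonal dict (objective: alternative algorithm).

-- Shared first lines of both Pythons:
-- lines = [l for l in grid.splitlines() if l.strip()]   (rows kept as char lists)
def pvLines (grid : String) : List (List Char) :=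
  ((PySem.Str.splitlines grid).filter (fun l => !(PySem.Str.strip l == ""))).map String.toList

-- num_cols = max(len(line) for line in lines); Python's max raises ValueError on an empty
-- generator (excluded by Pre_); on nonempty input the 0 seed is exact since lengths are ≥ 0.
def pvMaxLen (lines : List (List Char)) : Int :=
  lines.foldl (fun m l => max m (l.length : Int)) 0

-- ===== PORT A =====
-- line[col] / lines[row][...] are ported with pyGet?; where Python raises IndexError
-- (a line shorter than num_cols, excluded by Pre_) pyGet? is none and filterMap skips it.
def get_all_strings (grid : String) : List String :=
  let lines := pvLines grid
  let R : Int := lines.length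
  let C : Int := pvMaxLen lines
  let rows := lines.map String.ofList
  let columns := (PySem.List.pyRange 0 C 1).map (fun c =>
    String.ofList (lines.filterMap (fun line => PySem.List.pyGet? line c)))
  let d1 := (PySem.List.pyRange 0 (R + C - 1) 1).map (fun d =>
    String.ofList ((PySem.List.pyRange 0 R 1).filterMap (fun r =>
      if 0 ≤ d - r ∧ d - r < C then
        (PySem.List.pyGet? lines r).bind (fun line => PySem.List.pyGet? line (d - r))
      else none)))
  let d2 := (PySem.List.pyRange 0 (R + C - 1) 1).map (fun d =>
    String.ofList ((PySem.List.pyRange 0 R 1).filterMap (fun r =>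
      if 0 ≤ r + d - (R - 1) ∧ r + d - (R - 1) < C then
        (PySem.List.pyGet? lines r).bind (fun line => PySem.List.pyGet? line (r + d - (R - 1)))
      else none)))
  rows ++ columns ++ d1 ++ d2

-- ===== PORT B =====
-- one pass over the cells; dict.setdefault(k, []).append(ch) is ported as
-- Dict.modify k [] (· ++ [ch]) (same resulting dict, including insertion order).
def get_all_strings_alt (grid : String) : List String :=
  let lines := pvLines grid
  let R : Int := lines.length
  let C : Int := pvMaxLen lines
  let st :=
    (PySem.List.enumerate lines).foldl (fun st rl =>
      (PySem.List.enumerate rl.2).foldl (fun st cc =>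
        (st.1.modify cc.1 [] (· ++ [cc.2]),
         st.2.1.modify (rl.1 + cc.1) [] (· ++ [cc.2]),
         st.2.2.modify (cc.1 - rl.1 + R - 1) [] (· ++ [cc.2]))) st)
      ((PySem.Dict.empty, PySem.Dict.empty, PySem.Dict.empty) :
        PySem.Dict Int (List Char) × PySem.Dict Int (List Char) × PySem.Dict Int (List Char))
  lines.map String.ofList
    ++ (PySem.List.pyRange 0 C 1).map (fun c => String.ofList (st.1.getD c []))
    ++ (PySem.List.pyRange 0 (R + C - 1) 1).map (fun d => String.ofList (st.2.1.getD d []))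
    ++ (PySem.List.pyRange 0 (R + C - 1) 1).map (fun d => String.ofList (st.2.2.getD d []))

-- ===== PRECONDITION & SPEC =====
-- Pre_ is exactly where the Python A returns: at least one non-blank line (else max(...)
-- raises ValueError) and every kept line of full width (else line[col] raises IndexError).
def Pre_get_all_strings (grid : String) : Prop :=
  pvLines grid ≠ [] ∧ ∀ l ∈ pvLines grid, (l.length : Int) = pvMaxLen (pvLines grid)
instance (grid : String) : Decidable (Pre_get_all_strings grid) := by
  unfold Pre_get_all_strings; infer_instance

def pvWitness_get_all_strings : String := "ab\ncd"

def Spec_get_all_strings (grid : String) (out : List String) : Prop := out = get_all_strings_alt grid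
instance (grid : String) (out : List String) : Decidable (Spec_get_all_strings grid out) := by unfold Spec_get_all_strings; infer_instance

-- ===== CLAIM (what is proved, stated in full; the proofs are below) =====
def Claim_equal_get_all_strings : Prop := ∀ (grid : String), Dom_get_all_strings grid → Pre_get_all_strings grid → Spec_get_all_strings grid (get_all_strings grid)

-- ===== LEMMAS AND PROOFS =====

-- a fold whose state is a triple updated componentwise splits into three folds
theorem pvFoldlProd3 {α σ₁ σ₂ σ₃ : Type} (l : List α)
    (f : σ₁ × σ₂ × σ₃ → α → σ₁ × σ₂ × σ₃)
    (f₁ : σ₁ → α → σ₁) (f₂ : σ₂ → α → σ₂) (f₃ : σ₃ → α → σ₃)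
    (h : ∀ s x, f s x = (f₁ s.1 x, f₂ s.2.1 x, f₃ s.2.2 x)) :
    ∀ (s : σ₁ × σ₂ × σ₃), l.foldl f s = (l.foldl f₁ s.1, l.foldl f₂ s.2.1, l.foldl f₃ s.2.2) := by
  induction l with
  | nil => intro s; rfl
  | cons x xs ih => intro s; rw [List.foldl_cons, h, ih]; rfl

-- grouping loop with a computed key: the bucket of k collects, in order, the second
-- components of the pairs whose key is k
theorem pvGetDFoldlModifyKey {α : Type} (l : List (α × Char)) (key : α × Char → Int)
    (d : PySem.Dict Int (List Char)) (k : Int) :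
    (l.foldl (fun d p => d.modify (key p) [] (· ++ [p.2])) d).getD k []
      = d.getD k [] ++ (l.filter (fun p => key p == k)).map (·.2) := by
  induction l generalizing d with
  | nil => simp
  | cons p l ih =>
    simp only [List.foldl_cons, ih, List.filter_cons]
    rw [PySem.Dict.getD_modify]
    by_cases hk : key p = k
    · simp [hk]
    · simp [hk, Ne.symm hk]

-- nested version: a row-by-row grouping loop flattens to one bucket description
theorem pvGetDNestedFoldl (rows : List (Int × List Char)) (key : Int → Int → Int)
    (d : PySem.Dict Int (List Char)) (k : Int) :
    (rows.foldl (fun d rl => (PySem.List.enumerate rl.2).foldl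
        (fun d cc => d.modify (key rl.1 cc.1) [] (· ++ [cc.2])) d) d).getD k []
      = d.getD k [] ++ rows.flatMap (fun rl =>
          ((PySem.List.enumerate rl.2).filter (fun cc => key rl.1 cc.1 == k)).map (·.2)) := by
  induction rows generalizing d with
  | nil => simp
  | cons rl rows ih =>
    simp only [List.foldl_cons, ih, List.flatMap_cons]
    rw [pvGetDFoldlModifyKey (PySem.List.enumerate rl.2) (fun cc => key rl.1 cc.1)]
    simp [List.append_assoc]

-- a filter of enumerate that selects at most the absolute index s + c0
theorem pvEnumFilterOpt {q : Int → Bool} (l : List Char) (s : Int) (c0 : Nat)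
    (h : ∀ i : Int, s ≤ i → i < s + l.length → (q i = true ↔ i = s + c0)) :
    ((PySem.List.enumerate l s).filter (fun p => q p.1)).map (·.2) = (l[c0]?).toList := by
  induction l generalizing s c0 with
  | nil => simp [PySem.List.enumerate]
  | cons x xs ih =>
    have h' : ∀ i : Int, s ≤ i → i < s + (xs.length : Int) + 1 → (q i = true ↔ i = s + c0) := by
      intro i h1 h2
      exact h i h1 (by simp only [List.length_cons]; push_cast; omega)
    rw [PySem.List.enumerate_cons]
    simp only [List.filter_cons]
    cases c0 with
    | zero =>
      have hqs : q s = true := (h' s le_rfl (by omega)).mpr (by simp)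
      rw [hqs]
      simp only [if_true, List.map_cons]
      have hfil : (PySem.List.enumerate xs (s+1)).filter (fun p => q p.1) = [] := by
        apply List.filter_eq_nil_iff.mpr
        intro p hp
        rcases (PySem.List.mem_enumerate_iff _ _ _).mp hp with ⟨j, hj, rfl⟩
        simp only [Bool.not_eq_true]
        cases hq : q ((s+1) + (j:Int)) with
        | false => rfl
        | true =>
          have := (h' ((s+1)+(j:Int)) (by omega) (by omega)).mp hq
          simp at this
          omega
      rw [hfil]
      simp
    | succ c0 =>
      have hqs : q s = false := by
        cases hq : q s with
        | false => rfl
        | true =>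
          have := (h' s le_rfl (by omega)).mp hq
          push_cast at this
          omega
      rw [hqs]
      simp only [Bool.false_eq_true, if_false, List.getElem?_cons_succ]
      refine ih (s+1) c0 ?_
      intro i h1 h2
      rw [h' i (by omega) (by omega)]
      constructor <;> intro hh <;> omega

-- flatMap of the Option.toList of f is filterMap f
theorem pvFlatMapToList {α β : Type} (l : List α) (f : α → Option β) :
    l.flatMap (fun x => (f x).toList) = l.filterMap f := by
  induction l with
  | nil => rfl
  | cons x xs ih => cases hx : f x <;> simp [List.flatMap_cons, hx, ih]

-- flatMap congruence on members
theorem pvFlatMapCongr {α β : Type} {l : List α} {f g : α → List β}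
    (h : ∀ x ∈ l, f x = g x) : l.flatMap f = l.flatMap g := by
  induction l with
  | nil => rfl
  | cons x xs ih =>
    simp only [List.flatMap_cons]
    rw [h x (by simp), ih (fun y hy => h y (by simp [hy]))]

-- flatMap over enumerated rows of a function of the row only drops the enumeration
theorem pvFlatMapSnd {H : List Char → List Char} (L : List (List Char)) :
    ∀ s : Int, (PySem.List.enumerate L s).flatMap (fun rl => H rl.2) = L.flatMap H := by
  induction L with
  | nil => intro s; rfl
  | cons x xs ih =>
    intro s
    rw [PySem.List.enumerate_cons, List.flatMap_cons, List.flatMap_cons, ih]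

-- one row's contribution to the bucket of an absolute target index e
theorem pvRowContribution (line : List Char) (e : Int) (q : Int → Bool)
    (hq : ∀ i : Int, 0 ≤ i → i < (line.length : Int) → (q i = true ↔ i = e)) :
    ((PySem.List.enumerate line).filter (fun p => q p.1)).map (·.2)
      = (if 0 ≤ e ∧ e < (line.length : Int) then PySem.List.pyGet? line e else none).toList := by
  by_cases he : 0 ≤ e ∧ e < (line.length : Int)
  · rw [if_pos he, PySem.List.pyGet?_of_nonneg line he.1]
    refine pvEnumFilterOpt line 0 e.toNat ?_
    intro i h1 h2
    rw [hq i (by omega) (by omega)]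
    have := Int.toNat_of_nonneg he.1
    omega
  · rw [if_neg he]
    have hc0 : line.length ≤ (if 0 ≤ e then e.toNat else line.length) := by
      split_ifs with h0
      · have := Int.toNat_of_nonneg h0
        omega
      · exact le_rfl
    rw [pvEnumFilterOpt line 0 (if 0 ≤ e then e.toNat else line.length) ?_]
    · rw [List.getElem?_eq_none hc0]
    · intro i h1 h2
      rw [hq i (by omega) (by omega)]
      split_ifs with h0
      · have := Int.toNat_of_nonneg h0
        omega
      · omega

-- the bucket flatMap over the enumerated rows equals A's filterMap over range(R),
-- given a pointwise description of each row's contribution as an Option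
theorem pvBucketToFilterMap (L : List (List Char)) (G : Int × List Char → List Char)
    (F : Int → Option Char)
    (h : ∀ (k : Nat) (hk : k < L.length), G ((k : Int), L[k]) = (F (k : Int)).toList) :
    (PySem.List.enumerate L).flatMap G
      = (PySem.List.pyRange 0 (L.length : Int) 1).filterMap F := by
  have h1 : (PySem.List.enumerate L).flatMap G
      = (PySem.List.enumerate L).flatMap (fun rl => (F rl.1).toList) := by
    refine pvFlatMapCongr ?_
    intro rl hrl
    rcases (PySem.List.mem_enumerate_iff _ _ _).mp hrl with ⟨k, hk, rfl⟩
    simpa using h k hk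
  rw [h1]
  have h2 : (PySem.List.enumerate L).flatMap (fun rl => (F rl.1).toList)
      = ((PySem.List.enumerate L).map (·.1)).flatMap (fun j => (F j).toList) := by
    rw [List.flatMap_map]
  rw [h2, PySem.List.map_fst_enumerate]
  simp only [zero_add]
  rw [pvFlatMapToList]

-- core equality of the two port bodies, with the line list and width abstracted
theorem pvPortsEq (L : List (List Char)) (C : Int)
    (hlen : ∀ l ∈ L, (l.length : Int) = C) :
    (let R : Int := L.length
     let rows := L.map String.ofList
     let columns := (PySem.List.pyRange 0 C 1).map (fun c =>
       String.ofList (L.filterMap (fun line => PySem.List.pyGet? line c)))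
     let d1 := (PySem.List.pyRange 0 (R + C - 1) 1).map (fun d =>
       String.ofList ((PySem.List.pyRange 0 R 1).filterMap (fun r =>
         if 0 ≤ d - r ∧ d - r < C then
           (PySem.List.pyGet? L r).bind (fun line => PySem.List.pyGet? line (d - r))
         else none)))
     let d2 := (PySem.List.pyRange 0 (R + C - 1) 1).map (fun d =>
       String.ofList ((PySem.List.pyRange 0 R 1).filterMap (fun r =>
         if 0 ≤ r + d - (R - 1) ∧ r + d - (R - 1) < C then
           (PySem.List.pyGet? L r).bind (fun line => PySem.List.pyGet? line (r + d - (R - 1)))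
         else none)))
     rows ++ columns ++ d1 ++ d2)
    = (let R : Int := L.length
       let st :=
         (PySem.List.enumerate L).foldl (fun st rl =>
           (PySem.List.enumerate rl.2).foldl (fun st cc =>
             (st.1.modify cc.1 [] (· ++ [cc.2]),
              st.2.1.modify (rl.1 + cc.1) [] (· ++ [cc.2]),
              st.2.2.modify (cc.1 - rl.1 + R - 1) [] (· ++ [cc.2]))) st)
           ((PySem.Dict.empty, PySem.Dict.empty, PySem.Dict.empty) :
             PySem.Dict Int (List Char) × PySem.Dict Int (List Char) × PySem.Dict Int (List Char))
       L.map String.ofList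
         ++ (PySem.List.pyRange 0 C 1).map (fun c => String.ofList (st.1.getD c []))
         ++ (PySem.List.pyRange 0 (R + C - 1) 1).map (fun d => String.ofList (st.2.1.getD d []))
         ++ (PySem.List.pyRange 0 (R + C - 1) 1).map (fun d => String.ofList (st.2.2.getD d []))) := by
  have hsplit :
      (PySem.List.enumerate L).foldl (fun st rl =>
        (PySem.List.enumerate rl.2).foldl (fun st cc =>
          (st.1.modify cc.1 [] (· ++ [cc.2]),
           st.2.1.modify (rl.1 + cc.1) [] (· ++ [cc.2]),
           st.2.2.modify (cc.1 - rl.1 + (L.length : Int) - 1) [] (· ++ [cc.2]))) st)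
        ((PySem.Dict.empty, PySem.Dict.empty, PySem.Dict.empty) :
          PySem.Dict Int (List Char) × PySem.Dict Int (List Char) × PySem.Dict Int (List Char))
      = ((PySem.List.enumerate L).foldl (fun d rl => (PySem.List.enumerate rl.2).foldl
           (fun d cc => d.modify cc.1 [] (· ++ [cc.2])) d) PySem.Dict.empty,
         (PySem.List.enumerate L).foldl (fun d rl => (PySem.List.enumerate rl.2).foldl
           (fun d cc => d.modify (rl.1 + cc.1) [] (· ++ [cc.2])) d) PySem.Dict.empty,
         (PySem.List.enumerate L).foldl (fun d rl => (PySem.List.enumerate rl.2).foldl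
           (fun d cc => d.modify (cc.1 - rl.1 + (L.length : Int) - 1) [] (· ++ [cc.2])) d) PySem.Dict.empty) :=
    pvFoldlProd3 _ _ _ _ _ (fun s rl => pvFoldlProd3 (PySem.List.enumerate rl.2) _
      (fun d cc => d.modify cc.1 [] (· ++ [cc.2]))
      (fun d cc => d.modify (rl.1 + cc.1) [] (· ++ [cc.2]))
      (fun d cc => d.modify (cc.1 - rl.1 + (L.length : Int) - 1) [] (· ++ [cc.2]))
      (fun s cc => rfl) s) _
  dsimp only
  rw [hsplit]
  have hcols : (PySem.List.pyRange 0 C 1).map (fun c =>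
        String.ofList (L.filterMap (fun line => PySem.List.pyGet? line c)))
      = (PySem.List.pyRange 0 C 1).map (fun c => String.ofList
          (((PySem.List.enumerate L).foldl (fun d rl => (PySem.List.enumerate rl.2).foldl
            (fun d cc => d.modify cc.1 [] (· ++ [cc.2])) d) PySem.Dict.empty).getD c [])) := by
    refine List.map_congr_left ?_
    intro c hc
    rw [PySem.List.mem_pyRange_one] at hc
    congr 1
    have h1 := pvGetDNestedFoldl (PySem.List.enumerate L) (fun _ i => i) PySem.Dict.empty c
    simp only [] at h1
    rw [h1, PySem.Dict.getD_empty, List.nil_append,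
        pvFlatMapSnd (H := fun line => ((PySem.List.enumerate line).filter
          (fun cc => cc.1 == c)).map (·.2)) L 0]
    rw [pvFlatMapCongr (g := fun line => (PySem.List.pyGet? line c).toList) ?_,
        pvFlatMapToList]
    intro line hline
    have hlc := hlen line hline
    rw [pvRowContribution line c (fun i => i == c) (by intro i _ _; simp)]
    rw [if_pos (by constructor <;> omega)]
  have hd1 : (PySem.List.pyRange 0 ((L.length : Int) + C - 1) 1).map (fun d =>
        String.ofList ((PySem.List.pyRange 0 (L.length : Int) 1).filterMap (fun r =>
          if 0 ≤ d - r ∧ d - r < C then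
            (PySem.List.pyGet? L r).bind (fun line => PySem.List.pyGet? line (d - r))
          else none)))
      = (PySem.List.pyRange 0 ((L.length : Int) + C - 1) 1).map (fun d => String.ofList
          (((PySem.List.enumerate L).foldl (fun d rl => (PySem.List.enumerate rl.2).foldl
            (fun d cc => d.modify (rl.1 + cc.1) [] (· ++ [cc.2])) d) PySem.Dict.empty).getD d [])) := by
    refine List.map_congr_left ?_
    intro d _
    congr 1
    have h1 := pvGetDNestedFoldl (PySem.List.enumerate L) (fun r i => r + i) PySem.Dict.empty d
    simp only [] at h1
    rw [h1, PySem.Dict.getD_empty, List.nil_append]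
    refine (pvBucketToFilterMap L _ _ ?_).symm
    intro k hk
    have hlc := hlen L[k] (List.getElem_mem hk)
    simp only []
    rw [pvRowContribution L[k] (d - (k : Int)) (fun i => (k : Int) + i == d)
        (by intro i _ _; simp; omega)]
    rw [hlc]
    by_cases hg : 0 ≤ d - (k : Int) ∧ d - (k : Int) < C
    · rw [if_pos hg, if_pos hg]
      rw [PySem.List.pyGet?_natCast, List.getElem?_eq_getElem hk, Option.bind_some]
    · rw [if_neg hg, if_neg hg]
  have hd2 : (PySem.List.pyRange 0 ((L.length : Int) + C - 1) 1).map (fun d =>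
        String.ofList ((PySem.List.pyRange 0 (L.length : Int) 1).filterMap (fun r =>
          if 0 ≤ r + d - ((L.length : Int) - 1) ∧ r + d - ((L.length : Int) - 1) < C then
            (PySem.List.pyGet? L r).bind (fun line => PySem.List.pyGet? line (r + d - ((L.length : Int) - 1)))
          else none)))
      = (PySem.List.pyRange 0 ((L.length : Int) + C - 1) 1).map (fun d => String.ofList
          (((PySem.List.enumerate L).foldl (fun d rl => (PySem.List.enumerate rl.2).foldl
            (fun d cc => d.modify (cc.1 - rl.1 + (L.length : Int) - 1) [] (· ++ [cc.2])) d) PySem.Dict.empty).getD d [])) := by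
    refine List.map_congr_left ?_
    intro d _
    congr 1
    have h1 := pvGetDNestedFoldl (PySem.List.enumerate L)
      (fun r i => i - r + (L.length : Int) - 1) PySem.Dict.empty d
    simp only [] at h1
    rw [h1, PySem.Dict.getD_empty, List.nil_append]
    refine (pvBucketToFilterMap L _ _ ?_).symm
    intro k hk
    have hlc := hlen L[k] (List.getElem_mem hk)
    simp only []
    rw [pvRowContribution L[k] ((k : Int) + d - ((L.length : Int) - 1))
        (fun i => i - (k : Int) + (L.length : Int) - 1 == d)
        (by intro i _ _; simp; omega)]
    rw [hlc]
    by_cases hg : 0 ≤ (k : Int) + d - ((L.length : Int) - 1) ∧ (k : Int) + d - ((L.length : Int) - 1) < C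
    · rw [if_pos hg, if_pos hg]
      rw [PySem.List.pyGet?_natCast, List.getElem?_eq_getElem hk, Option.bind_some]
    · rw [if_neg hg, if_neg hg]
  rw [hcols, hd1, hd2]

theorem pv_main (grid : String) (h : Pre_get_all_strings grid) :
    get_all_strings grid = get_all_strings_alt grid := by
  exact pvPortsEq (pvLines grid) (pvMaxLen (pvLines grid)) h.2

-- ===== VERDICT (by name: the statement is the Claim_ definition above) =====
theorem get_all_strings_spec : Claim_equal_get_all_strings := by
  intro grid _ hpre
  unfold Spec_get_all_strings
  exact pv_main grid hpre
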